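-- pv_equiv track=rewrite | github.com/Pan-Maciek/Geometric-Algorithms-Laboratories | lab4/defs2.py | iter_3
-- ===== SOURCE A (Python) =====
-- def iter_3(values):
--     it = iter(values)
--     a, b = next(it), next(it)
--     v0, v1 = a, b
--     for c in it:
--         yield a, b, c
--         a, b = b, c
--     yield (a, b, v0)
--     yield (b, v0, v1)
-- ===== SOURCE B (Python) =====
-- def iter_3(values):
--     seq = list(values)
--     n = len(seq)
--     for i in range(n):
--         yield (seq[i], seq[(i + 1) % n], seq[(i + 2) % n])
-- ===== Notes on version B (the rewrite author's own statement) =====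
-- stated objective: simpler
-- what changed: B materializes the sequence once and yields each cyclic triple by modular indexing (seq[i], seq[(i+1)%n], seq[(i+2)%n]) in one plain loop, instead of A's streaming two-element sliding window with two hand-written wrap-around closing yields.
import Mathlib
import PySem

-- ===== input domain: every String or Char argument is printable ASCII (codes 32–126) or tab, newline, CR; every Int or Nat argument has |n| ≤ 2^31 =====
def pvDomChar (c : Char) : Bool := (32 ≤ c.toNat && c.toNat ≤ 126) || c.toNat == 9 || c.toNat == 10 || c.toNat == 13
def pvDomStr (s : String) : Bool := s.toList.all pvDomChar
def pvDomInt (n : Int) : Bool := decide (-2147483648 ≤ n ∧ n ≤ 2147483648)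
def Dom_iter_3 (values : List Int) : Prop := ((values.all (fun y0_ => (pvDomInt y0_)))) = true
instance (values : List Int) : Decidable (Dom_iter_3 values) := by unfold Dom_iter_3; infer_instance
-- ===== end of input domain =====

-- B replaces A's streaming sliding window (with two hand-written wrap-around closing
-- yields) by one loop over indices with modular indexing; objective: simpler.

-- ===== PORT A =====
-- A's generator: prime the window with the first two elements, then for each further
-- element yield (a, b, c) and slide; finally two wrap-around yields.  On lists with
-- fewer than two elements the Python generator raises RuntimeError (excluded by Pre_).
def iter_3 (values : List Int) : List (Int × Int × Int) :=
  match values with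
  | a :: b :: rest =>
    let s := rest.foldl
      (fun (s : List (Int × Int × Int) × Int × Int) c =>
        (s.1 ++ [(s.2.1, s.2.2, c)], s.2.2, c)) ([], a, b)
    s.1 ++ [(s.2.1, s.2.2, a), (s.2.2, a, b)]
  | _ => []  -- Python raises RuntimeError here; outside Pre_

-- ===== PORT B =====
-- B: seq[i], seq[(i+1)%n], seq[(i+2)%n] for i in range(n); indices are in range.
def iter_3_alt (values : List Int) : List (Int × Int × Int) :=
  let n := values.length
  (List.range n).map (fun i =>
    (values.getD i 0, values.getD ((i + 1) % n) 0, values.getD ((i + 2) % n) 0))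

-- ===== PRECONDITION & SPEC =====
-- Pre_ excludes lists with fewer than two elements, on which Python A raises
-- RuntimeError (StopIteration converted inside the generator).
def Pre_iter_3 (values : List Int) : Prop := 2 ≤ values.length
instance (values : List Int) : Decidable (Pre_iter_3 values) := by unfold Pre_iter_3; infer_instance
def pvWitness_iter_3 : List Int := ([1, 2, 3])

def Spec_iter_3 (values : List Int) (out : List (Int × Int × Int)) : Prop := out = iter_3_alt values
instance (values : List Int) (out : List (Int × Int × Int)) : Decidable (Spec_iter_3 values out) := by unfold Spec_iter_3; infer_instance

-- ===== CLAIM (what is proved, stated in full; the proofs are below) =====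
def Claim_equal_iter_3 : Prop := ∀ (values : List Int), Dom_iter_3 values → Pre_iter_3 values → Spec_iter_3 values (iter_3 values)

-- ===== LEMMAS AND PROOFS =====

-- the sequence of window triples A yields in its loop
def trip (a b : Int) : List Int → List (Int × Int × Int)
  | [] => []
  | c :: l => (a, b, c) :: trip b c l

-- the final window state (last two elements)
def lastTwo (a b : Int) : List Int → Int × Int
  | [] => (a, b)
  | c :: l => lastTwo b c l

theorem foldl_windows (l : List Int) (acc : List (Int × Int × Int)) (a b : Int) :
    l.foldl (fun (s : List (Int × Int × Int) × Int × Int) c =>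
        (s.1 ++ [(s.2.1, s.2.2, c)], s.2.2, c)) (acc, a, b)
      = (acc ++ trip a b l, lastTwo a b l) := by
  induction l generalizing acc a b with
  | nil => simp [trip, lastTwo]
  | cons c l ih => simp [trip, lastTwo, List.foldl_cons, ih]

theorem trip_eq (l : List Int) (a b : Int) :
    trip a b l = (List.range l.length).map (fun i =>
      ((a :: b :: l).getD i 0, (a :: b :: l).getD (i + 1) 0, (a :: b :: l).getD (i + 2) 0)) := by
  induction l generalizing a b with
  | nil => simp [trip]
  | cons c l ih =>
    simp only [trip, List.length_cons, List.range_succ_eq_map, List.map_cons, List.map_map]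
    refine congrArg₂ _ rfl ?_
    rw [ih b c]
    refine List.map_congr_left (fun i _ => ?_)
    simp

theorem lastTwo_eq (l : List Int) (a b : Int) :
    lastTwo a b l = ((a :: b :: l).getD l.length 0, (a :: b :: l).getD (l.length + 1) 0) := by
  induction l generalizing a b with
  | nil => simp [lastTwo]
  | cons c l ih => simpa [lastTwo] using ih b c

-- ===== VERDICT (by name: the statement is the Claim_ definition above) =====
theorem iter_3_spec : Claim_equal_iter_3 := by
  intro values _hdom hpre
  unfold Spec_iter_3
  match values, hpre with
  | a :: b :: l, _ =>
    show iter_3 (a :: b :: l) = iter_3_alt (a :: b :: l)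
    have hA : iter_3 (a :: b :: l)
        = trip a b l ++ [((lastTwo a b l).1, (lastTwo a b l).2, a), ((lastTwo a b l).2, a, b)] := by
      simp [iter_3, foldl_windows l [] a b]
    set L := a :: b :: l with hL
    have hn : L.length = l.length + 2 := by simp [hL]
    have hB : iter_3_alt L
        = (List.range l.length).map (fun i => (L.getD i 0, L.getD (i + 1) 0, L.getD (i + 2) 0))
          ++ [(L.getD l.length 0, L.getD (l.length + 1) 0, a), (L.getD (l.length + 1) 0, a, b)] := by
      simp only [iter_3_alt, hn]
      rw [show l.length + 2 = (l.length + 1) + 1 from rfl, List.range_succ, List.range_succ]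
      simp only [List.map_append, List.map_cons, List.map_nil, List.append_assoc]
      refine congrArg₂ _ ?_ ?_
      · refine List.map_congr_left (fun i hi => ?_)
        have hi' : i < l.length := List.mem_range.mp hi
        have h2 : (i + 1) % (l.length + 1 + 1) = i + 1 := Nat.mod_eq_of_lt (by omega)
        have h3 : (i + 2) % (l.length + 1 + 1) = i + 2 := Nat.mod_eq_of_lt (by omega)
        rw [h2, h3]
      · have e1 : (l.length + 1) % (l.length + 1 + 1) = l.length + 1 :=
          Nat.mod_eq_of_lt (by omega)
        have e2 : (l.length + 2) % (l.length + 1 + 1) = 0 := Nat.mod_self _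
        have e4 : (l.length + 1 + 2) % (l.length + 1 + 1) = 1 := by
          rw [show l.length + 1 + 2 = (l.length + 1 + 1) + 1 from rfl, Nat.add_mod_left]
          exact Nat.mod_eq_of_lt (by omega)
        have g0 : L.getD 0 0 = a := by simp [hL]
        have g1 : L.getD 1 0 = b := by simp [hL]
        rw [e1, e2, e4, g0, g1]; rfl
    rw [hA, hB, trip_eq, lastTwo_eq]
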